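-- pv_equiv track=rewrite | github.com/bee85919/coding-test-python | 프로그래머스/lv3/84021. 퍼즐 조각 채우기/퍼즐 조각 채우기.py | solution
-- ===== SOURCE A (Python) =====
-- def solution(game_board, table):
--     n = len(game_board)
--     dr, dc = [0, 0, 1, -1], [1, -1, 0, 0]
--
--     # BFS를 이용해 mat에서 num 값(블록 또는 빈 공간)을 찾아 그룹화된 도형의 리스트로 반환하는 함수
--     def bfs(mat, num):
--         # 방문 여부를 저장하는 2차원 리스트
--         visit = [[0]*n for _ in range(n)]
--         # 발견된 도형들을 저장할 리스트
--         shapes = []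
--
--         # mat 전체를 순회
--         for i in range(n):
--             for j in range(n):
--                 # 현재 위치가 이미 방문한 곳이거나 찾고자 하는 num 값이 아닌 경우 continue를 이용해 스킵
--                 if mat[i][j] != num or visit[i][j]:
--                     continue
--
--                 # 현재 위치에서 시작하는 새로운 도형을 저장할 리스트
--                 shape = []
--                 # BFS를 위한 큐. 현재 위치를 시작으로 함.
--                 queue = [[i, j]]
--                 # 현재 위치는 방문했음을 표시
--                 visit[i][j] = 1
--
--                 # BFS 실행
--                 while queue:
--                     r, c = queue.pop(0)   # 현재 방문하고 있는 위치
--                     shape.append([r, c])  # 도형에 현재 위치 추가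
--                     for d in range(4):    # 현재 위치의 상하좌우 검사
--                         nr, nc = r + dr[d], c + dc[d]
--                         # 새로운 위치가 경계 안에 있고, 아직 방문하지 않았으며, 찾고자하는 num 값인 경우
--                         if 0 <= nr < n and 0 <= nc < n and not visit[nr][nc] and mat[nr][nc] == num:
--                             queue.append([nr, nc])  # 큐에 추가
--                             visit[nr][nc] = 1       # 방문 표시
--
--                 # 현재까지 찾은 도형을 shapes 리스트에 추가
--                 shapes.append(shape)
--
--         # 발견된 도형들의 리스트 반환
--         return shapes
--
--     # 도형의 좌표를 정규화하고 문자열로 변환하는 함수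
--     def hashing(shape):
--         min_r, min_c = min([s[0] for s in shape]), min([s[1] for s in shape])
--         normalized = [[s[0]-min_r, s[1]-min_c] for s in shape]
--         normalized.sort()
--         return ''.join(str(s) for sub in normalized for s in sub)
--
--     # 도형의 좌표를 90도 회전시키는 함수
--     def rotate(shape):
--         return [[s[1], -s[0]] for s in shape]
--
--     # table에서 블록들을 찾고, game_board에서 빈칸들을 찾는다
--     blocks = bfs(table, 1)
--     blanks = bfs(game_board, 0)
--
--     # 블록들의 해시값을 계산하고 이를 딕셔너리에 저장
--     block_hashes = {}
--     for block in blocks: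
--         block_hash = hashing(block)
--         block_hashes[block_hash] = block_hashes.get(block_hash, 0) + 1
--
--     answer = 0  # 매칭된 블록의 총 크기를 저장할 변수
--
--     # game_board의 각 빈칸에 대해서 매칭되는 블록을 table에서 찾는다
--     for blank in blanks:
--         # 해당 빈칸이 이미 다른 블록과 매칭되었는지 확인하는 플래그
--         matched = False
--
--         # 빈칸을 4번 90도씩 회전시키면서 해당 빈칸에 매칭되는 블록이 있는지 검사
--         for _ in range(4):
--             # 만약 해당 빈칸이 이미 다른 블록과 매칭되었다면 더 이상의 회전 및 검사는 필요 없으므로 반복문 종료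
--             if matched:
--                 break
--
--             # 현재 빈칸의 해시 값을 계산
--             blank_hash = hashing(blank)
--
--             # 해당 해시 값과 일치하는 블록이 block_hashes 딕셔너리에 존재하는지 확인
--             if block_hashes.get(blank_hash):
--                 # 매칭된 블록의 개수를 1 감소시킴
--                 block_hashes[blank_hash] -= 1
--
--                 # 해당 블록의 크기만큼 answer에 더함 (해당 블록이 game_board에 채워짐을 의미)
--                 answer += len(blank)
--
--                 # 해당 빈칸이 매칭되었음을 표시
--                 matched = True
--
--             # 빈칸을 90도 회전
--             blank = rotate(blank)
--
--     return answer
-- ===== SOURCE B (Python) =====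
-- def solution(game_board, table):
--     n = len(game_board)
--
--     # recursive depth-first flood fill (A uses an iterative FIFO-queue BFS with a
--     # visit matrix); cell discovery order differs but hashing sorts, so hashes agree
--     def components(mat, val):
--         seen = set()
--
--         def dfs(r, c, shape):
--             seen.add((r, c))
--             shape.append((r, c))
--             for nr, nc in ((r, c + 1), (r, c - 1), (r + 1, c), (r - 1, c)):
--                 if 0 <= nr < n and 0 <= nc < n and (nr, nc) not in seen and mat[nr][nc] == val:
--                     dfs(nr, nc, shape)
--             return shape
--
--         return [dfs(i, j, [])
--                 for i in range(n) for j in range(n)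
--                 if mat[i][j] == val and (i, j) not in seen]
--
--     def hashing(shape):
--         min_r = min(s[0] for s in shape)
--         min_c = min(s[1] for s in shape)
--         normalized = sorted((r - min_r, c - min_c) for r, c in shape)
--         return ''.join(str(x) for cell in normalized for x in cell)
--
--     # recursive matcher: try up to `rotations` successive 90-degree turns,
--     # consume one matching block and return the filled size, else 0
--     def consume(shape, hashes, rotations=4):
--         if rotations == 0:
--             return 0
--         h = hashing(shape)
--         if hashes.get(h):
--             hashes[h] -= 1
--             return len(shape)
--         return consume([(c, -r) for r, c in shape], hashes, rotations - 1)
--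
--     hashes = {}
--     for block in components(table, 1):
--         h = hashing(block)
--         hashes[h] = hashes.get(h, 0) + 1
--
--     return sum(consume(blank, hashes) for blank in components(game_board, 0))
-- ===== Notes on version B (the rewrite author's own statement) =====
-- stated objective: alternative
-- what changed: A's iterative FIFO-queue BFS over a visit matrix is replaced by a recursive depth-first flood fill over a visited set (discovery order differs; the sorted hash makes it irrelevant), and A's flag-guarded 4-rotation loop is replaced by a recursive matcher that returns the consumed size; the answer is a sum over that matcher instead of a running accumulator.
import Mathlib
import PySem

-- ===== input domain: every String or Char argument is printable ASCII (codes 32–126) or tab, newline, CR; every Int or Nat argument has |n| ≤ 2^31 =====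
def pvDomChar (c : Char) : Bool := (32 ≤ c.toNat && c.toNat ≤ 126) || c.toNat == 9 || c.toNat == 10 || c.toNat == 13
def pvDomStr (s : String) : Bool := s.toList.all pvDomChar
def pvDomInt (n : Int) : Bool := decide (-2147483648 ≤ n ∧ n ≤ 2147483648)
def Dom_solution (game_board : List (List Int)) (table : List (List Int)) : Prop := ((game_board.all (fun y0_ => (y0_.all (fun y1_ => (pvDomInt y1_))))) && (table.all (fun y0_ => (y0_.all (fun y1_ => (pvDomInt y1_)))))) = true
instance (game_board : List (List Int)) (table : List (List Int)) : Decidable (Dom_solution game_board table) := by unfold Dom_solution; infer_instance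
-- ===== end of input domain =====

-- B replaces A's iterative FIFO-queue BFS over a visit matrix by a recursive
-- depth-first flood fill over a visited set, and A's flag-guarded 4-rotation
-- matching loop by a recursive matcher returning the consumed size; cell
-- discovery order differs, but the hash sorts coordinates, so hashes agree.

-- ----- helpers shared by the two ports: both Pythons contain this identical code -----

-- mat[i][j] (total form; Pre_solution guarantees every access is in bounds)
def mget (mat : List (List Int)) (i j : Int) : Int :=
  PySem.List.pyGetD (PySem.List.pyGetD mat i []) j 0

-- the four neighbours of (r,c), in the order both Pythons try them
-- (A: `for d in range(4)` over dr = [0,0,1,-1], dc = [1,-1,0,0], unrolled; B: literal tuple)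
def nbs (rc : Int × Int) : List (Int × Int) :=
  [(rc.1, rc.2 + 1), (rc.1, rc.2 - 1), (rc.1 + 1, rc.2), (rc.1 - 1, rc.2)]

-- hashing(shape): identical in A and B (cells [r,c] / (r,c) are ported as pairs).
-- min(...): shape is nonempty at every call site, so the .getD 0 default is never used;
-- Python's lexicographic sort of the 2-element cells is sorted2 on the two components (exact).
def hashing (shape : List (Int × Int)) : String :=
  let minr := (PySem.List.min? (shape.map Prod.fst) (fun x => x)).getD 0
  let minc := (PySem.List.min? (shape.map Prod.snd) (fun x => x)).getD 0
  let normalized := shape.map (fun p => (p.1 - minr, p.2 - minc))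
  let sortedN := PySem.List.sorted2 normalized (fun p => p.1) (fun p => p.2)
  PySem.Str.join "" ((sortedN.flatMap (fun p => [p.1, p.2])).map PySem.Int.toStr)

-- ===== PORT A =====

-- rotate(shape) of A
def rotateS (shape : List (Int × Int)) : List (Int × Int) :=
  shape.map (fun p => (p.2, -p.1))

-- visit[r][c] reuses mget (same total indexing form); visit[r][c] = 1 is vset
def vset (v : List (List Int)) (r c : Int) : List (List Int) :=
  PySem.List.pySetD v r (PySem.List.pySetD (PySem.List.pyGetD v r []) c 1)

-- body of A's `for d in range(4)`: mark and enqueue a fresh in-bounds matching neighbour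
-- (visit entries are 0/1, so `not visit[nr][nc]` is `= 0`)
def nbA (mat : List (List Int)) (num : Int) (n : Nat)
    (st : List (List Int) × List (Int × Int)) (nb : Int × Int) :
    List (List Int) × List (Int × Int) :=
  if 0 ≤ nb.1 ∧ nb.1 < (n : Int) ∧ 0 ≤ nb.2 ∧ nb.2 < (n : Int) ∧
      mget st.1 nb.1 nb.2 = 0 ∧ mget mat nb.1 nb.2 = num then
    (vset st.1 nb.1 nb.2, st.2 ++ [nb])
  else st

-- the whole neighbour scan A performs for one popped cell
def stepA (mat : List (List Int)) (num : Int) (n : Nat)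
    (st : List (List Int) × List (Int × Int)) (rc : Int × Int) :
    List (List Int) × List (Int × Int) :=
  (nbs rc).foldl (nbA mat num n) st

-- A's `while queue:` loop; fuel (n*n+1 at every call) only guards termination and is
-- proved never to run out
def qloopA (mat : List (List Int)) (num : Int) (n : Nat) :
    Nat → List (Int × Int) → List (List Int) → List (Int × Int) →
    List (Int × Int) × List (List Int)
  | fuel, queue, visit, shape =>
    match queue, fuel with
    | [], _ => (shape, visit)
    | _ :: _, 0 => (shape, visit)
    | rc :: rest, fuel + 1 =>
      let st := stepA mat num n (visit, []) rc
      qloopA mat num n fuel (rest ++ st.2) st.1 (shape ++ [rc])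

-- A's bfs(mat, num): row-major scan seeding a BFS at each unvisited matching cell
def bfsA (mat : List (List Int)) (num : Int) (n : Nat) : List (List (Int × Int)) :=
  ((List.range n).foldl (fun (st : List (List Int) × List (List (Int × Int))) (i : Nat) =>
    (List.range n).foldl (fun st (j : Nat) =>
      if mget mat (i : Int) (j : Int) ≠ num ∨ mget st.1 (i : Int) (j : Int) ≠ 0 then st
      else
        let visit1 := vset st.1 (i : Int) (j : Int)
        let r := qloopA mat num n (n * n + 1) [((i : Int), (j : Int))] visit1 []
        (r.2, st.2 ++ [r.1])) st)
    (List.replicate n (List.replicate n 0), [])).2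

-- one pass of A's rotation loop (state: blank, matched, block_hashes, answer)
def stepMA (st : List (Int × Int) × Bool × PySem.Dict String Int × Int) (_ : Nat) :
    List (Int × Int) × Bool × PySem.Dict String Int × Int :=
  if st.2.1 then st
  else
    let h := hashing st.1
    let cnt := st.2.2.1.getD h 0
    if cnt ≠ 0 then
      (rotateS st.1, true, st.2.2.1.insert h (cnt - 1), st.2.2.2 + (st.1.length : Int))
    else (rotateS st.1, false, st.2.2.1, st.2.2.2)

def solution (game_board : List (List Int)) (table : List (List Int)) : Int :=
  let n := game_board.length
  let blocks := bfsA table 1 n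
  let blanks := bfsA game_board 0 n
  let bh := blocks.foldl
    (fun (d : PySem.Dict String Int) b => d.insert (hashing b) (d.getD (hashing b) 0 + 1))
    PySem.Dict.empty
  (blanks.foldl (fun (st : PySem.Dict String Int × Int) blank =>
      let r := (List.range 4).foldl stepMA (blank, false, st.1, st.2)
      (r.2.2.1, r.2.2.2)) (bh, 0)).2

-- ===== PORT B =====

-- B's recursive dfs(r, c, shape): mark the cell, append it, recurse on each fresh
-- in-bounds matching neighbour; fuel (n*n+1 at the seed, decreasing with recursion
-- depth) only guards termination and is proved never to run out
def dfsB (mat : List (List Int)) (num : Int) (n : Nat) :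
    Nat → Int × Int → PySem.Set (Int × Int) × List (Int × Int) →
    PySem.Set (Int × Int) × List (Int × Int)
  | 0, _, st => st
  | fuel + 1, p, st =>
    (nbs p).foldl (fun st' nb =>
      if 0 ≤ nb.1 ∧ nb.1 < (n : Int) ∧ 0 ≤ nb.2 ∧ nb.2 < (n : Int) ∧
          nb ∉ st'.1 ∧ mget mat nb.1 nb.2 = num then
        dfsB mat num n fuel nb st'
      else st')
      (PySem.Set.add st.1 p, st.2 ++ [p])

-- B's components(mat, val): the row-major comprehension seeding a dfs per new cell
def componentsB (mat : List (List Int)) (num : Int) (n : Nat) : List (List (Int × Int)) :=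
  ((List.range n).foldl (fun (st : PySem.Set (Int × Int) × List (List (Int × Int))) (i : Nat) =>
    (List.range n).foldl (fun st (j : Nat) =>
      if mget mat (i : Int) (j : Int) = num ∧ ((i : Int), (j : Int)) ∉ st.1 then
        let r := dfsB mat num n (n * n + 1) ((i : Int), (j : Int)) (st.1, [])
        (r.1, st.2 ++ [r.2])
      else st) st)
    (PySem.Set.empty, [])).2

-- B's recursive consume(shape, hashes, rotations): returns (hashes, gained size)
def consume : Nat → List (Int × Int) → PySem.Dict String Int →
    PySem.Dict String Int × Int
  | 0, _, d => (d, 0)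
  | k + 1, shape, d =>
    let h := hashing shape
    if d.getD h 0 ≠ 0 then (d.insert h (d.getD h 0 - 1), (shape.length : Int))
    else consume k (shape.map (fun p => (p.2, -p.1))) d

def solution_alt (game_board : List (List Int)) (table : List (List Int)) : Int :=
  let n := game_board.length
  let bh := (componentsB table 1 n).foldl
    (fun (d : PySem.Dict String Int) b => d.insert (hashing b) (d.getD (hashing b) 0 + 1))
    PySem.Dict.empty
  ((componentsB game_board 0 n).foldl (fun (st : PySem.Dict String Int × Int) blank =>
      let r := consume 4 blank st.1
      (r.1, st.2 + r.2)) (bh, 0)).2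

-- ===== PRECONDITION & SPEC =====

-- A indexes game_board[i][j] and table[i][j] for all 0 ≤ i,j < len(game_board):
-- anything shorter raises IndexError, so exactly those inputs are excluded.
def Pre_solution (game_board : List (List Int)) (table : List (List Int)) : Prop :=
  (∀ row ∈ game_board, game_board.length ≤ row.length) ∧
  game_board.length ≤ table.length ∧
  (∀ row ∈ table.take game_board.length, game_board.length ≤ row.length)

instance (game_board : List (List Int)) (table : List (List Int)) :
    Decidable (Pre_solution game_board table) := by unfold Pre_solution; infer_instance

def pvWitness_solution : List (List Int) × List (List Int) := ([[0]], [[1]])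

def Spec_solution (game_board : List (List Int)) (table : List (List Int)) (out : Int) : Prop :=
  out = solution_alt game_board table
instance (game_board : List (List Int)) (table : List (List Int)) (out : Int) :
    Decidable (Spec_solution game_board table out) := by unfold Spec_solution; infer_instance

-- ===== CLAIM (what is proved, stated in full; the proofs are below) =====
def Claim_equal_solution : Prop := ∀ (game_board : List (List Int)) (table : List (List Int)), Dom_solution game_board table → Pre_solution game_board table → Spec_solution game_board table (solution game_board table)

-- ===== LEMMAS AND PROOFS =====

-- in-bounds cells of the n × n grid
def InbP (n : Nat) (p : Int × Int) : Prop :=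
  0 ≤ p.1 ∧ p.1 < (n : Int) ∧ 0 ≤ p.2 ∧ p.2 < (n : Int)

-- a cell both flood fills may enter, relative to the blocked predicate V0
def AllowedR (mat : List (List Int)) (num : Int) (n : Nat)
    (V0 : Int × Int → Prop) (q : Int × Int) : Prop :=
  InbP n q ∧ mget mat q.1 q.2 = num ∧ ¬ V0 q

def StepR (mat : List (List Int)) (num : Int) (n : Nat)
    (V0 : Int × Int → Prop) (p q : Int × Int) : Prop :=
  q ∈ nbs p ∧ AllowedR mat num n V0 q

-- reachability through allowed cells: the common characterisation of both flood fills
def ReachR (mat : List (List Int)) (num : Int) (n : Nat)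
    (V0 : Int × Int → Prop) (p q : Int × Int) : Prop :=
  Relation.ReflTransGen (StepR mat num n V0) p q

-- visit matrix is n × n
def Dims (n : Nat) (v : List (List Int)) : Prop :=
  v.length = n ∧ ∀ row ∈ v, row.length = n

-- number of still-unmarked entries (the termination potential of A's loop)
def zeros (v : List (List Int)) : Nat :=
  (v.map (fun row => row.countP (fun x => decide (x = 0)))).sum

-- ---- visit-matrix access ----

theorem dims_rows {n : Nat} {v : List (List Int)} (hd : Dims n v)
    {i : Nat} (hi : i < v.length) : (v[i]'hi).length = n :=
  hd.2 _ (List.getElem_mem hi)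

theorem mget_eq {v : List (List Int)} {r c : Int} (hr : 0 ≤ r) (hc : 0 ≤ c) :
    mget v r c = (v.getD r.toNat []).getD c.toNat 0 := by
  obtain ⟨m, rfl⟩ : ∃ m : Nat, r = (m : Int) := ⟨r.toNat, by omega⟩
  obtain ⟨k, rfl⟩ : ∃ k : Nat, c = (k : Int) := ⟨c.toNat, by omega⟩
  unfold mget
  rw [PySem.List.pyGetD_natCast, PySem.List.pyGetD_natCast]
  simp

theorem vset_eq {v : List (List Int)} {r c : Int} (hr : 0 ≤ r) (hc : 0 ≤ c) :
    vset v r c = v.set r.toNat ((v.getD r.toNat []).set c.toNat 1) := by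
  obtain ⟨m, rfl⟩ : ∃ m : Nat, r = (m : Int) := ⟨r.toNat, by omega⟩
  obtain ⟨k, rfl⟩ : ∃ k : Nat, c = (k : Int) := ⟨c.toNat, by omega⟩
  unfold vset
  rw [PySem.List.pyGetD_natCast, PySem.List.pySetD_of_nonneg _ _ (by positivity),
    PySem.List.pySetD_of_nonneg _ _ (by positivity)]
  simp

theorem getD2_set (v : List (List Int)) (rt ct rt' ct' : Nat) (hrt : rt < v.length) :
    ((v.set rt ((v.getD rt []).set ct 1)).getD rt' []).getD ct' 0
      = if rt' = rt ∧ ct' = ct ∧ ct < (v.getD rt []).length then 1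
        else (v.getD rt' []).getD ct' 0 := by
  rcases Decidable.em (rt' = rt) with hrr | hrr
  · subst hrr
    have houter : (v.set rt' ((v.getD rt' []).set ct 1)).getD rt' []
        = (v.getD rt' []).set ct 1 := by
      rw [List.getD_eq_getElem?_getD, List.getElem?_set_self']
      simp [hrt, List.getD_eq_getElem?_getD]
    rw [houter]
    rcases Decidable.em (ct' = ct) with hcc | hcc
    · subst hcc
      rcases Decidable.em (ct' < (v.getD rt' []).length) with hlt | hlt
      · rw [if_pos ⟨rfl, rfl, hlt⟩, List.getD_eq_getElem?_getD, List.getElem?_set_self']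
        simp [List.getElem?_eq_getElem (by simpa using hlt)]
      · rw [if_neg (by tauto), List.set_eq_of_length_le (by omega)]
    · rw [if_neg (by tauto), List.getD_eq_getElem?_getD, List.getD_eq_getElem?_getD,
        List.getElem?_set_ne (by omega)]
      simp [List.getD_eq_getElem?_getD]
  · rw [if_neg (by tauto), List.getD_eq_getElem?_getD, List.getD_eq_getElem?_getD,
      List.getElem?_set_ne (by omega)]
    simp [List.getD_eq_getElem?_getD]

theorem dims_vset {n : Nat} {v : List (List Int)} (hd : Dims n v)
    {r c : Int} (hr : 0 ≤ r) (hr2 : r < (n : Int)) (hc : 0 ≤ c) (hc2 : c < (n : Int)) :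
    Dims n (vset v r c) := by
  rw [vset_eq hr hc]
  refine ⟨by simpa using hd.1, ?_⟩
  intro row hrow
  rcases List.mem_or_eq_of_mem_set hrow with h | h
  · exact hd.2 _ h
  · subst h
    have hrn : r.toNat < v.length := by rw [hd.1]; omega
    rw [List.length_set, List.getD_eq_getElem _ _ hrn]
    exact dims_rows hd hrn

theorem row_len {n : Nat} {v : List (List Int)} (hd : Dims n v)
    {r : Int} (hr : 0 ≤ r) (hr2 : r < (n : Int)) :
    (v.getD r.toNat []).length = n := by
  have hrn : r.toNat < v.length := by rw [hd.1]; omega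
  rw [List.getD_eq_getElem _ _ hrn]
  exact dims_rows hd hrn

theorem mget_vset_self {n : Nat} {v : List (List Int)} (hd : Dims n v)
    {r c : Int} (hr : 0 ≤ r) (hr2 : r < (n : Int)) (hc : 0 ≤ c) (hc2 : c < (n : Int)) :
    mget (vset v r c) r c = 1 := by
  have hrn : r.toNat < v.length := by rw [hd.1]; omega
  rw [mget_eq hr hc, vset_eq hr hc, getD2_set v r.toNat c.toNat r.toNat c.toNat hrn,
    if_pos ⟨rfl, rfl, by rw [row_len hd hr hr2]; omega⟩]

theorem mget_vset_ne {n : Nat} {v : List (List Int)} (hd : Dims n v)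
    {r c r' c' : Int} (hr : 0 ≤ r) (hr2 : r < (n : Int)) (hc : 0 ≤ c) (hc2 : c < (n : Int))
    (hr' : 0 ≤ r') (hr2' : r' < (n : Int)) (hc' : 0 ≤ c') (hc2' : c' < (n : Int))
    (hne : (r', c') ≠ (r, c)) :
    mget (vset v r c) r' c' = mget v r' c' := by
  have hrn : r.toNat < v.length := by rw [hd.1]; omega
  rw [mget_eq hr' hc', mget_eq hr' hc', vset_eq hr hc,
    getD2_set v r.toNat c.toNat r'.toNat c'.toNat hrn, if_neg]
  rintro ⟨h1, h2, _⟩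
  exact hne (by rw [show r' = r by omega, show c' = c by omega])

-- ---- zeros bookkeeping ----

theorem countP_set_zero (l : List Int) :
    ∀ (k : Nat) (h : k < l.length), l[k] = 0 →
      (l.set k 1).countP (fun x => decide (x = 0)) + 1 = l.countP (fun x => decide (x = 0)) := by
  induction l with
  | nil => intro k h; simp at h
  | cons a t ih =>
    intro k h hk
    cases k with
    | zero =>
      simp only [List.getElem_cons_zero] at hk; subst hk
      simp [List.countP_cons]
    | succ k =>
      have h' : k < t.length := by simpa using h
      have hk' : t[k] = 0 := by simpa using hk
      simp only [List.set_cons_succ, List.countP_cons]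
      have := ih k h' hk'
      omega

theorem sum_set_nat (l : List Nat) :
    ∀ (k : Nat) (h : k < l.length) (x : Nat), (l.set k x).sum + l[k] = l.sum + x := by
  induction l with
  | nil => intro k h; simp at h
  | cons a t ih =>
    intro k h x
    cases k with
    | zero => simp [List.sum_cons]; omega
    | succ k =>
      simp only [List.set_cons_succ, List.sum_cons, List.getElem_cons_succ]
      have := ih k (by simpa using h) x
      omega

theorem zeros_vset {n : Nat} {v : List (List Int)} (hd : Dims n v)
    {r c : Int} (hr : 0 ≤ r) (hr2 : r < (n : Int)) (hc : 0 ≤ c) (hc2 : c < (n : Int))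
    (h0 : mget v r c = 0) :
    zeros (vset v r c) + 1 = zeros v := by
  have hrn : r.toNat < v.length := by rw [hd.1]; omega
  have hcn : c.toNat < (v[r.toNat]'hrn).length := by rw [dims_rows hd hrn]; omega
  rw [mget_eq hr hc, List.getD_eq_getElem _ _ hrn, List.getD_eq_getElem _ _ hcn] at h0
  rw [vset_eq hr hc, List.getD_eq_getElem _ _ hrn]
  unfold zeros
  rw [List.map_set]
  have hlen : r.toNat < (v.map (fun row => row.countP (fun x => decide (x = 0)))).length := by
    simpa using hrn
  have hsum := sum_set_nat (v.map (fun row => row.countP (fun x => decide (x = 0)))) r.toNat hlen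
    (((v[r.toNat]'hrn).set c.toNat 1).countP (fun x => decide (x = 0)))
  have hget : (v.map (fun row => row.countP (fun x => decide (x = 0))))[r.toNat]'hlen
      = (v[r.toNat]'hrn).countP (fun x => decide (x = 0)) := by
    simp
  rw [hget] at hsum
  have hcount := countP_set_zero (v[r.toNat]'hrn) c.toNat hcn h0
  omega

theorem zeros_le {n : Nat} {v : List (List Int)} (hd : Dims n v) : zeros v ≤ n * n := by
  unfold zeros
  have h1 : ∀ x ∈ v.map (fun row => row.countP (fun x => decide (x = 0))), x ≤ n := by
    intro x hx
    rcases List.mem_map.1 hx with ⟨row, hrow, rfl⟩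
    calc row.countP _ ≤ row.length := List.countP_le_length
    _ = n := hd.2 _ hrow
  calc (v.map (fun row => row.countP (fun x => decide (x = 0)))).sum
      ≤ (v.map (fun row => row.countP (fun x => decide (x = 0)))).length * n := by
        simpa [smul_eq_mul] using
          List.sum_le_card_nsmul (v.map (fun row => row.countP (fun x => decide (x = 0)))) n h1
    _ = n * n := by rw [List.length_map, hd.1, Nat.mul_comm]

theorem dims_init (n : Nat) : Dims n (List.replicate n (List.replicate n 0)) := by
  constructor
  · simp
  · intro row hrow
    rw [List.eq_of_mem_replicate hrow]; simp

theorem mget_init (n : Nat) {q : Int × Int} (hq : InbP n q) :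
    mget (List.replicate n (List.replicate n (0 : Int))) q.1 q.2 = 0 := by
  obtain ⟨h1, h2, h3, h4⟩ := hq
  rw [mget_eq h1 h3]
  have hrn : q.1.toNat < n := by omega
  have hcn : q.2.toNat < n := by omega
  have hrow : (List.replicate n (List.replicate n (0 : Int))).getD q.1.toNat []
      = List.replicate n (0 : Int) := by
    rw [List.getD_eq_getElem _ _ (by simpa using hrn)]; simp
  rw [hrow, List.getD_eq_getElem _ _ (by simpa using hcn)]
  simp

-- ---- generic fold lemmas ----

theorem foldl_snd_append {α σ β : Type} (f : σ × List β → α → σ × List β)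
    (hf : ∀ (s : σ) (acc : List β) (x : α),
      f (s, acc) x = ((f (s, []) x).1, acc ++ (f (s, []) x).2)) :
    ∀ (l : List α) (s : σ) (acc : List β),
      l.foldl f (s, acc) = ((l.foldl f (s, [])).1, acc ++ (l.foldl f (s, [])).2) := by
  intro l
  induction l with
  | nil => simp
  | cons x t ih =>
    intro s acc
    simp only [List.foldl_cons]
    rw [hf s acc x, hf s [] x, List.nil_append, ih _ (acc ++ (f (s, []) x).2),
      ih _ ((f (s, []) x).2)]
    simp

theorem nbA_acc (mat : List (List Int)) (num : Int) (n : Nat)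
    (s : List (List Int)) (acc : List (Int × Int)) (x : Int × Int) :
    nbA mat num n (s, acc) x = ((nbA mat num n (s, []) x).1, acc ++ (nbA mat num n (s, []) x).2) := by
  unfold nbA
  by_cases h : 0 ≤ x.1 ∧ x.1 < (n : Int) ∧ 0 ≤ x.2 ∧ x.2 < (n : Int) ∧
      mget s x.1 x.2 = 0 ∧ mget mat x.1 x.2 = num
  · simp [h]
  · simp [h]

theorem foldl_nested {σ : Type} (F : σ → Nat → Nat → σ) (n : Nat) (init : σ) :
    (List.range n).foldl (fun st i => (List.range n).foldl (fun st j => F st i j) st) init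
      = ((List.range n).flatMap (fun i => (List.range n).map (fun j => (i, j)))).foldl
          (fun st p => F st p.1 p.2) init := by
  have h : ∀ (l : List Nat) (init : σ),
      l.foldl (fun st i => (List.range n).foldl (fun st j => F st i j) st) init
        = (l.flatMap (fun i => (List.range n).map (fun j => (i, j)))).foldl
            (fun st p => F st p.1 p.2) init := by
    intro l
    induction l with
    | nil => simp
    | cons x t ih =>
      intro init
      simp only [List.flatMap_cons, List.foldl_append, List.foldl_cons]
      rw [← ih, List.foldl_map]
  exact h (List.range n) init

theorem mem_pairs {n : Nat} {p : Nat × Nat}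
    (hp : p ∈ (List.range n).flatMap (fun i => (List.range n).map (fun j => (i, j)))) :
    p.1 < n ∧ p.2 < n := by
  rcases List.mem_flatMap.1 hp with ⟨i, hi, hmem⟩
  rcases List.mem_map.1 hmem with ⟨j, hj, rfl⟩
  exact ⟨List.mem_range.1 hi, List.mem_range.1 hj⟩

-- ---- A's neighbour sweep for one popped cell ----

theorem nbA_fold_spec (mat : List (List Int)) (num : Int) (n : Nat) :
    ∀ (nl : List (Int × Int)) (v : List (List Int)), Dims n v →
      Dims n (nl.foldl (nbA mat num n) (v, [])).1 ∧
      (nl.foldl (nbA mat num n) (v, [])).2.Nodup ∧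
      (∀ q, InbP n q → (mget (nl.foldl (nbA mat num n) (v, [])).1 q.1 q.2 ≠ 0 ↔
          mget v q.1 q.2 ≠ 0 ∨ q ∈ (nl.foldl (nbA mat num n) (v, [])).2)) ∧
      (∀ q ∈ (nl.foldl (nbA mat num n) (v, [])).2,
          q ∈ nl ∧ InbP n q ∧ mget mat q.1 q.2 = num ∧ mget v q.1 q.2 = 0) ∧
      (∀ q ∈ nl, InbP n q → mget mat q.1 q.2 = num →
          mget (nl.foldl (nbA mat num n) (v, [])).1 q.1 q.2 ≠ 0) ∧
      zeros (nl.foldl (nbA mat num n) (v, [])).1 + (nl.foldl (nbA mat num n) (v, [])).2.length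
        = zeros v := by
  intro nl
  induction nl with
  | nil =>
    intro v hd
    refine ⟨hd, by simp, by simp, by simp, by simp, by simp⟩
  | cons x t ih =>
    intro v hd
    simp only [List.foldl_cons]
    by_cases hg : 0 ≤ x.1 ∧ x.1 < (n : Int) ∧ 0 ≤ x.2 ∧ x.2 < (n : Int) ∧
        mget v x.1 x.2 = 0 ∧ mget mat x.1 x.2 = num
    · have hx : nbA mat num n (v, []) x = (vset v x.1 x.2, [x]) := by
        unfold nbA; rw [if_pos hg]; rfl
      rw [hx]
      have hInb : InbP n x := ⟨hg.1, hg.2.1, hg.2.2.1, hg.2.2.2.1⟩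
      have hd1 : Dims n (vset v x.1 x.2) := dims_vset hd hg.1 hg.2.1 hg.2.2.1 hg.2.2.2.1
      have hself := mget_vset_self hd hg.1 hg.2.1 hg.2.2.1 hg.2.2.2.1
      have hz := zeros_vset hd hg.1 hg.2.1 hg.2.2.1 hg.2.2.2.1 hg.2.2.2.2.1
      have hsplit := foldl_snd_append (nbA mat num n) (nbA_acc mat num n) t (vset v x.1 x.2) [x]
      rw [hsplit]
      obtain ⟨ihd, ihnd, ihiff, ihmem, ihall, ihz⟩ := ih (vset v x.1 x.2) hd1
      have hchg : ∀ q, InbP n q → q ≠ x → mget (vset v x.1 x.2) q.1 q.2 = mget v q.1 q.2 := by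
        intro q hq hne
        exact mget_vset_ne hd hg.1 hg.2.1 hg.2.2.1 hg.2.2.2.1 hq.1 hq.2.1 hq.2.2.1 hq.2.2.2
          (by simpa [Prod.ext_iff] using (fun h1 h2 => hne (Prod.ext h1 h2)))
      refine ⟨ihd, ?_, ?_, ?_, ?_, ?_⟩
      · -- nodup of [x] ++ added
        simp only [List.nodup_cons, List.singleton_append]
        refine ⟨?_, ihnd⟩
        intro hxmem
        have := (ihmem x hxmem).2.2.2
        rw [hself] at this
        omega
      · intro q hq
        simp only [List.singleton_append, List.mem_cons]
        by_cases hqx : q = x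
        · subst hqx
          constructor
          · intro _; right; left; rfl
          · intro _
            have hmono : mget (vset v q.1 q.2 ) q.1 q.2 ≠ 0 := by rw [hself]; omega
            exact ((ihiff q hq).2 (Or.inl hmono))
        · rw [ihiff q hq, hchg q hq hqx]
          tauto
      · intro q hqmem
        have hq' : q = x ∨ q ∈ (t.foldl (nbA mat num n) (vset v x.1 x.2, [])).2 := by
          simpa using hqmem
        rcases hq' with rfl | hqr
        · exact ⟨List.mem_cons_self, hInb, hg.2.2.2.2.2, hg.2.2.2.2.1⟩
        · obtain ⟨hq1, hq2, hq3, hq4⟩ := ihmem q hqr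
          refine ⟨List.mem_cons_of_mem _ hq1, hq2, hq3, ?_⟩
          by_cases hqx : q = x
          · subst hqx; rw [hself] at hq4; omega
          · rw [hchg q hq2 hqx] at hq4; exact hq4
      · intro q hq hqi hqn
        rcases List.mem_cons.1 hq with hq | hq
        · subst hq
          by_cases hmm : mget (vset v q.1 q.2) q.1 q.2 ≠ 0
          · exact ((ihiff q hqi).2 (Or.inl hmm))
          · rw [hself] at hmm; omega
        · exact ihall q hq hqi hqn
      · simp only [List.length_append, List.length_cons, List.length_nil]
        omega
    · have hx : nbA mat num n (v, []) x = (v, []) := by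
        unfold nbA; rw [if_neg hg]
      rw [hx]
      obtain ⟨ihd, ihnd, ihiff, ihmem, ihall, ihz⟩ := ih v hd
      refine ⟨ihd, ihnd, ihiff, ?_, ?_, ihz⟩
      · intro q hq
        obtain ⟨h1, h2, h3, h4⟩ := ihmem q hq
        exact ⟨List.mem_cons_of_mem _ h1, h2, h3, h4⟩
      · intro q hq hqi hqn
        rcases List.mem_cons.1 hq with hq | hq
        · subst hq
          have hv : mget v q.1 q.2 ≠ 0 := by
            obtain ⟨i1, i2, i3, i4⟩ := hqi
            intro h0
            exact hg ⟨i1, i2, i3, i4, h0, hqn⟩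
          exact (ihiff q hqi).2 (Or.inl hv)
        · exact ihall q hq hqi hqn

-- ---- A's queue loop computes exactly the reachable set ----

theorem qloopA_spec (mat : List (List Int)) (num : Int) (n : Nat)
    (V0 : Int × Int → Prop) (seed : Int × Int) :
    ∀ (fuel : Nat) (queue : List (Int × Int)) (v : List (List Int)) (shape : List (Int × Int)),
      Dims n v →
      (∀ q, InbP n q → (mget v q.1 q.2 ≠ 0 ↔ V0 q ∨ q ∈ shape ∨ q ∈ queue)) →
      (shape ++ queue).Nodup →
      (∀ p ∈ shape ++ queue, AllowedR mat num n V0 p ∧ ReachR mat num n V0 seed p) →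
      (∀ p ∈ shape, ∀ q ∈ nbs p, AllowedR mat num n V0 q → q ∈ shape ∨ q ∈ queue) →
      zeros v + queue.length ≤ fuel →
      Dims n (qloopA mat num n fuel queue v shape).2 ∧
      (qloopA mat num n fuel queue v shape).1.Nodup ∧
      (∀ q, InbP n q → (mget (qloopA mat num n fuel queue v shape).2 q.1 q.2 ≠ 0 ↔
          V0 q ∨ q ∈ (qloopA mat num n fuel queue v shape).1)) ∧
      (∀ p ∈ (qloopA mat num n fuel queue v shape).1,
          AllowedR mat num n V0 p ∧ ReachR mat num n V0 seed p) ∧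
      (∀ p ∈ (qloopA mat num n fuel queue v shape).1, ∀ q ∈ nbs p,
          AllowedR mat num n V0 q → q ∈ (qloopA mat num n fuel queue v shape).1) ∧
      (∀ p ∈ shape ++ queue, p ∈ (qloopA mat num n fuel queue v shape).1) := by
  intro fuel
  induction fuel with
  | zero =>
    intro queue v shape hd h2 h3 h4 h5 h6
    match queue with
    | [] =>
      simp only [qloopA]
      refine ⟨hd, by simpa using h3, ?_, ?_, ?_, by simp⟩
      · intro q hq; rw [h2 q hq]; simp
      · intro p hp; exact h4 p (by simpa using hp)
      · intro p hp q hq ha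
        rcases h5 p (by simpa using hp) q hq ha with h | h
        · exact h
        · simp at h
    | rc :: rest => simp at h6
  | succ fuel ih =>
    intro queue v shape hd h2 h3 h4 h5 h6
    match queue with
    | [] =>
      simp only [qloopA]
      refine ⟨hd, by simpa using h3, ?_, ?_, ?_, by simp⟩
      · intro q hq; rw [h2 q hq]; simp
      · intro p hp; exact h4 p (by simpa using hp)
      · intro p hp q hq ha
        rcases h5 p (by simpa using hp) q hq ha with h | h
        · exact h
        · simp at h
    | rc :: rest =>
      show Dims n (qloopA mat num n fuel (rest ++ (stepA mat num n (v, []) rc).2)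
          (stepA mat num n (v, []) rc).1 (shape ++ [rc])).2 ∧ _
      set st := stepA mat num n (v, []) rc with hst
      obtain ⟨sd, snd, siff, smem, sall, sz⟩ := nbA_fold_spec mat num n (nbs rc) v hd
      have hrcq : rc ∈ shape ++ (rc :: rest) := by simp
      have hrcA := h4 rc hrcq
      -- new hypotheses for the recursive call
      have h2' : ∀ q, InbP n q → (mget st.1 q.1 q.2 ≠ 0 ↔
          V0 q ∨ q ∈ shape ++ [rc] ∨ q ∈ rest ++ st.2) := by
        intro q hq
        rw [show st.1 = ((nbs rc).foldl (nbA mat num n) (v, [])).1 from rfl]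
        rw [siff q hq, h2 q hq]
        simp only [List.mem_append, List.mem_cons, List.mem_singleton]
        tauto
      have hdisj : ∀ q ∈ st.2, q ∉ shape ++ (rc :: rest) := by
        intro q hq hmem
        obtain ⟨_, hqi, _, hq0⟩ := smem q hq
        have := (h2 q hqi).2 (by
          rcases List.mem_append.1 hmem with h | h
          · exact Or.inr (Or.inl h)
          · exact Or.inr (Or.inr h))
        exact this hq0
      have hallowed : ∀ q ∈ st.2, AllowedR mat num n V0 q := by
        intro q hq
        obtain ⟨_, hqi, hqn, hq0⟩ := smem q hq
        refine ⟨hqi, hqn, ?_⟩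
        intro hv0
        exact ((h2 q hqi).2 (Or.inl hv0)) hq0
      have h3' : ((shape ++ [rc]) ++ (rest ++ st.2)).Nodup := by
        have : ((shape ++ rc :: rest) ++ st.2).Nodup :=
          List.Nodup.append h3 snd (fun q hq hq2 => hdisj q hq2 hq)
        simpa [List.append_assoc] using this
      have h4' : ∀ p ∈ (shape ++ [rc]) ++ (rest ++ st.2),
          AllowedR mat num n V0 p ∧ ReachR mat num n V0 seed p := by
        intro p hp
        simp only [List.mem_append, List.mem_singleton] at hp
        rcases hp with (hp | hp) | (hp | hp)
        · exact h4 p (by simp [hp])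
        · subst hp; exact hrcA
        · exact h4 p (by simp [hp])
        · refine ⟨hallowed p hp, ?_⟩
          exact Relation.ReflTransGen.tail hrcA.2 ⟨(smem p hp).1, hallowed p hp⟩
      have h5' : ∀ p ∈ shape ++ [rc], ∀ q ∈ nbs p, AllowedR mat num n V0 q →
          q ∈ shape ++ [rc] ∨ q ∈ rest ++ st.2 := by
        intro p hp q hq ha
        rcases List.mem_append.1 hp with hp | hp
        · rcases h5 p hp q hq ha with h | h
          · exact Or.inl (List.mem_append.2 (Or.inl h))
          · rcases List.mem_cons.1 h with h | h
            · exact Or.inl (by simp [h])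
            · exact Or.inr (List.mem_append.2 (Or.inl h))
        · have hprc : p = rc := by simpa using hp
          subst hprc
          have := sall q hq ha.1 ha.2.1
          have hmm := (h2' q ha.1).1 this
          rcases hmm with h | h | h
          · exact absurd h ha.2.2
          · exact Or.inl h
          · exact Or.inr h
      have h6' : zeros st.1 + (rest ++ st.2).length ≤ fuel := by
        have : zeros st.1 + st.2.length = zeros v := sz
        simp only [List.length_append]
        simp only [List.length_cons] at h6
        omega
      obtain ⟨c1, c2, c3, c4, c5, c6⟩ := ih (rest ++ st.2) st.1 (shape ++ [rc]) sd h2' h3' h4' h5' h6'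
      refine ⟨c1, c2, c3, c4, c5, ?_⟩
      intro p hp
      apply c6
      simp only [List.mem_append, List.mem_cons, List.mem_singleton] at hp ⊢
      tauto

-- ---- B's flood-fill machinery: counting unvisited grid cells (fuel potential) ----

def gridL (n : Nat) : List (Int × Int) :=
  (List.range n).flatMap (fun (i : Nat) => (List.range n).map (fun (j : Nat) => ((i : Int), (j : Int))))

theorem mem_gridL {n : Nat} {q : Int × Int} : q ∈ gridL n ↔ InbP n q := by
  unfold gridL InbP
  constructor
  · intro hq
    rcases List.mem_flatMap.1 hq with ⟨i, hi, hmem⟩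
    rcases List.mem_map.1 hmem with ⟨j, hj, rfl⟩
    rw [List.mem_range] at hi hj
    exact ⟨show (0 : Int) ≤ (i : Int) from Int.natCast_nonneg i,
      show ((i : Nat) : Int) < (n : Int) from by exact_mod_cast hi,
      show (0 : Int) ≤ (j : Int) from Int.natCast_nonneg j,
      show ((j : Nat) : Int) < (n : Int) from by exact_mod_cast hj⟩
  · rintro ⟨h1, h2, h3, h4⟩
    refine List.mem_flatMap.2 ⟨q.1.toNat, List.mem_range.2 (by omega),
      List.mem_map.2 ⟨q.2.toNat, List.mem_range.2 (by omega), ?_⟩⟩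
    simp only [Prod.ext_iff]
    omega

def Ucnt (n : Nat) (s : PySem.Set (Int × Int)) : Nat :=
  (gridL n).countP (fun q => decide (q ∉ s))

theorem Ucnt_le (n : Nat) (s : PySem.Set (Int × Int)) : Ucnt n s ≤ n * n := by
  unfold Ucnt
  calc (gridL n).countP (fun q => decide (q ∉ s)) ≤ (gridL n).length := List.countP_le_length
  _ = n * n := by
    unfold gridL
    rw [List.length_flatMap]
    simp only [List.length_map, List.length_range]
    rw [List.map_const', List.sum_replicate, smul_eq_mul, List.length_range]

theorem Ucnt_mono {n : Nat} {s t : PySem.Set (Int × Int)}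
    (h : ∀ q, q ∈ s → q ∈ t) : Ucnt n t ≤ Ucnt n s := by
  unfold Ucnt
  apply List.countP_mono_left
  intro x _ hx
  simp only [decide_eq_true_eq] at hx ⊢
  exact fun hxs => hx (h x hxs)

theorem Ucnt_pos {n : Nat} {s : PySem.Set (Int × Int)} {p : Int × Int}
    (hp : InbP n p) (hps : p ∉ s) : 0 < Ucnt n s := by
  unfold Ucnt
  rw [List.countP_pos_iff]
  exact ⟨p, mem_gridL.2 hp, by simpa using hps⟩

theorem Ucnt_strict {n : Nat} {s t : PySem.Set (Int × Int)} {p : Int × Int}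
    (hp : InbP n p) (hps : p ∉ s) (ht : ∀ q, q ∈ t ↔ q ∈ s ∨ q = p) :
    Ucnt n t < Ucnt n s := by
  obtain ⟨l1, l2, hl⟩ := List.append_of_mem (mem_gridL.2 hp)
  unfold Ucnt
  rw [hl]
  simp only [List.countP_append, List.countP_cons]
  have hm : ∀ l : List (Int × Int),
      List.countP (fun q => decide (q ∉ t)) l ≤ List.countP (fun q => decide (q ∉ s)) l := by
    intro l
    apply List.countP_mono_left
    intro x _ hx
    simp only [decide_eq_true_eq] at hx ⊢
    exact fun hxs => hx ((ht x).2 (Or.inl hxs))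
  have hpt : (decide (p ∉ t)) = false := by
    simp only [decide_eq_false_iff_not, Decidable.not_not]
    exact (ht p).2 (Or.inr rfl)
  have hpsd : (decide (p ∉ s)) = true := by simpa using hps
  rw [hpt, hpsd]
  have h1 := hm l1
  have h2 := hm l2
  simp only [Bool.false_eq_true, if_false, if_true]
  omega

-- the body of B's neighbour loop, named for the proofs (defeq to the lambda in dfsB)
def dstep (mat : List (List Int)) (num : Int) (n : Nat) (fuel : Nat)
    (st : PySem.Set (Int × Int) × List (Int × Int)) (nb : Int × Int) :
    PySem.Set (Int × Int) × List (Int × Int) :=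
  if 0 ≤ nb.1 ∧ nb.1 < (n : Int) ∧ 0 ≤ nb.2 ∧ nb.2 < (n : Int) ∧
      nb ∉ st.1 ∧ mget mat nb.1 nb.2 = num then
    dfsB mat num n fuel nb st
  else st

theorem dfsB_succ (mat : List (List Int)) (num : Int) (n : Nat) (fuel : Nat)
    (p : Int × Int) (st : PySem.Set (Int × Int) × List (Int × Int)) :
    dfsB mat num n (fuel + 1) p st
      = (nbs p).foldl (dstep mat num n fuel) (PySem.Set.add st.1 p, st.2 ++ [p]) := rfl

-- ---- B's neighbour sweep: accumulated spec of the fold inside dfs ----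

theorem dfold_spec (mat : List (List Int)) (num : Int) (n : Nat) (fuel : Nat)
    (IH : ∀ (p : Int × Int) (s : PySem.Set (Int × Int)) (sh : List (Int × Int)),
      InbP n p → mget mat p.1 p.2 = num → p ∉ s → Ucnt n s ≤ fuel →
      ∃ Δ : List (Int × Int),
        (dfsB mat num n fuel p (s, sh)).2 = sh ++ Δ ∧
        (∀ q, q ∈ (dfsB mat num n fuel p (s, sh)).1 ↔ q ∈ s ∨ q ∈ Δ) ∧
        Δ.Nodup ∧ p ∈ Δ ∧
        (∀ q ∈ Δ, AllowedR mat num n (· ∈ s) q ∧ ReachR mat num n (· ∈ s) p q) ∧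
        (∀ q ∈ Δ, ∀ t ∈ nbs q, AllowedR mat num n (· ∈ s) t →
          t ∈ (dfsB mat num n fuel p (s, sh)).1)) :
    ∀ (nl : List (Int × Int)) (p : Int × Int) (s s₁ : PySem.Set (Int × Int))
      (sh₁ Δ₁ : List (Int × Int)),
      (∀ x ∈ nl, x ∈ nbs p) →
      (∀ q, q ∈ s₁ ↔ q ∈ s ∨ q ∈ Δ₁) → Δ₁.Nodup →
      (∀ q ∈ Δ₁, AllowedR mat num n (· ∈ s) q ∧ ReachR mat num n (· ∈ s) p q) →
      Ucnt n s₁ ≤ fuel →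
      ∃ Δ₂ : List (Int × Int),
        (nl.foldl (dstep mat num n fuel) (s₁, sh₁)).2 = sh₁ ++ Δ₂ ∧
        (∀ q, q ∈ (nl.foldl (dstep mat num n fuel) (s₁, sh₁)).1 ↔ q ∈ s ∨ q ∈ Δ₁ ++ Δ₂) ∧
        (Δ₁ ++ Δ₂).Nodup ∧
        (∀ q ∈ Δ₁ ++ Δ₂, AllowedR mat num n (· ∈ s) q ∧ ReachR mat num n (· ∈ s) p q) ∧
        (∀ q ∈ Δ₂, ∀ t ∈ nbs q, AllowedR mat num n (· ∈ s) t →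
          t ∈ (nl.foldl (dstep mat num n fuel) (s₁, sh₁)).1) ∧
        (∀ x ∈ nl, InbP n x → mget mat x.1 x.2 = num →
          x ∈ (nl.foldl (dstep mat num n fuel) (s₁, sh₁)).1) ∧
        Ucnt n (nl.foldl (dstep mat num n fuel) (s₁, sh₁)).1 ≤ fuel ∧
        (∀ q ∈ s₁, q ∈ (nl.foldl (dstep mat num n fuel) (s₁, sh₁)).1) := by
  intro nl
  induction nl with
  | nil =>
    intro p s s₁ sh₁ Δ₁ hnl hmem hnd hA hU
    refine ⟨[], by simp, by simpa using hmem, by simpa using hnd, by simpa using hA,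
      by simp, by simp, hU, ?_⟩
    intro q hq
    exact hq
  | cons x t ih =>
    intro p s s₁ sh₁ Δ₁ hnl hmem hnd hA hU
    simp only [List.foldl_cons]
    by_cases hg : 0 ≤ x.1 ∧ x.1 < (n : Int) ∧ 0 ≤ x.2 ∧ x.2 < (n : Int) ∧
        x ∉ s₁ ∧ mget mat x.1 x.2 = num
    · have hxi : InbP n x := ⟨hg.1, hg.2.1, hg.2.2.1, hg.2.2.2.1⟩
      have hxs₁ : x ∉ s₁ := hg.2.2.2.2.1
      have hxn : mget mat x.1 x.2 = num := hg.2.2.2.2.2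
      have hstepx : dstep mat num n fuel (s₁, sh₁) x = dfsB mat num n fuel x (s₁, sh₁) := by
        unfold dstep; rw [if_pos hg]
      rw [hstepx]
      obtain ⟨Δx, hx2, hxmem, hxnd, hxpin, hxAR, hxcl⟩ := IH x s₁ sh₁ hxi hxn hxs₁ hU
      have hsub : ∀ q, q ∈ s → q ∈ s₁ := fun q hq => (hmem q).2 (Or.inl hq)
      have hΔxns₁ : ∀ q ∈ Δx, q ∉ s₁ := fun q hq => (hxAR q hq).1.2.2
      have hstepPx : StepR mat num n (· ∈ s) p x :=
        ⟨hnl x List.mem_cons_self, hxi, hxn, fun hxs => hxs₁ (hsub x hxs)⟩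
      have hAR' : ∀ q ∈ Δ₁ ++ Δx,
          AllowedR mat num n (· ∈ s) q ∧ ReachR mat num n (· ∈ s) p q := by
        intro q hq
        rcases List.mem_append.1 hq with hq | hq
        · exact hA q hq
        · obtain ⟨⟨hi, hn2, hns₁⟩, hr⟩ := hxAR q hq
          refine ⟨⟨hi, hn2, fun hqs => hns₁ (hsub q hqs)⟩, ?_⟩
          refine Relation.ReflTransGen.head hstepPx ?_
          refine Relation.ReflTransGen.mono ?_ hr
          rintro a b ⟨hb1, hb2, hb3, hb4⟩
          exact ⟨hb1, hb2, hb3, fun hbs => hb4 (hsub b hbs)⟩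
      have hmem' : ∀ q, q ∈ (dfsB mat num n fuel x (s₁, sh₁)).1 ↔ q ∈ s ∨ q ∈ Δ₁ ++ Δx := by
        intro q
        rw [hxmem q, hmem q, List.mem_append]
        tauto
      have hnd' : (Δ₁ ++ Δx).Nodup := by
        refine List.Nodup.append hnd hxnd ?_
        intro q hq1 hq2
        exact hΔxns₁ q hq2 ((hmem q).2 (Or.inr hq1))
      have hU' : Ucnt n (dfsB mat num n fuel x (s₁, sh₁)).1 ≤ fuel :=
        le_trans (Ucnt_mono (fun q hq => (hxmem q).2 (Or.inl hq))) hU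
      obtain ⟨Δ₂', h1, h2, h3, h4, h5, h6, h7, h8⟩ :=
        ih p s (dfsB mat num n fuel x (s₁, sh₁)).1 (dfsB mat num n fuel x (s₁, sh₁)).2
          (Δ₁ ++ Δx) (fun y hy => hnl y (List.mem_cons_of_mem _ hy)) hmem' hnd' hAR' hU'
      have hgrow : ∀ q, q ∈ (dfsB mat num n fuel x (s₁, sh₁)).1 →
          q ∈ (t.foldl (dstep mat num n fuel) ((dfsB mat num n fuel x (s₁, sh₁)).1,
              (dfsB mat num n fuel x (s₁, sh₁)).2)).1 := h8
      refine ⟨Δx ++ Δ₂', ?_, ?_, ?_, ?_, ?_, ?_, h7, ?_⟩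
      · rw [h1, hx2, List.append_assoc]
      · intro q
        rw [h2 q]
        simp only [List.mem_append]
        tauto
      · simpa [List.append_assoc] using h3
      · intro q hq
        apply h4
        simp only [List.mem_append] at hq ⊢
        tauto
      · intro q hq r hr har
        rcases List.mem_append.1 hq with hq | hq
        · -- q discovered inside the recursive call on x
          by_cases hrs₁ : r ∈ s₁
          · exact hgrow r ((hxmem r).2 (Or.inl hrs₁))
          · obtain ⟨hi, hn2, _⟩ := har
            exact hgrow r (hxcl q hq r hr ⟨hi, hn2, hrs₁⟩)
        · exact h5 q hq r hr har
      · intro y hy hyi hyn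
        rcases List.mem_cons.1 hy with hy | hy
        · subst hy
          exact hgrow y ((hxmem y).2 (Or.inr hxpin))
        · exact h6 y hy hyi hyn
      · intro q hq
        exact hgrow q ((hxmem q).2 (Or.inl hq))
    · have hstepx : dstep mat num n fuel (s₁, sh₁) x = (s₁, sh₁) := by
        unfold dstep; rw [if_neg hg]
      rw [hstepx]
      obtain ⟨Δ₂, h1, h2, h3, h4, h5, h6, h7, h8⟩ :=
        ih p s s₁ sh₁ Δ₁ (fun y hy => hnl y (List.mem_cons_of_mem _ hy)) hmem hnd hA hU
      refine ⟨Δ₂, h1, h2, h3, h4, h5, ?_, h7, h8⟩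
      intro y hy hyi hyn
      rcases List.mem_cons.1 hy with hy | hy
      · subst hy
        have hys₁ : y ∈ s₁ := by
          by_contra hc
          exact hg ⟨hyi.1, hyi.2.1, hyi.2.2.1, hyi.2.2.2, hc, hyn⟩
        exact h8 y hys₁
      · exact h6 y hy hyi hyn

-- ---- B's dfs computes exactly the reachable set ----

theorem dfsB_spec (mat : List (List Int)) (num : Int) (n : Nat) :
    ∀ (fuel : Nat) (p : Int × Int) (s : PySem.Set (Int × Int)) (sh : List (Int × Int)),
      InbP n p → mget mat p.1 p.2 = num → p ∉ s → Ucnt n s ≤ fuel →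
      ∃ Δ : List (Int × Int),
        (dfsB mat num n fuel p (s, sh)).2 = sh ++ Δ ∧
        (∀ q, q ∈ (dfsB mat num n fuel p (s, sh)).1 ↔ q ∈ s ∨ q ∈ Δ) ∧
        Δ.Nodup ∧ p ∈ Δ ∧
        (∀ q ∈ Δ, AllowedR mat num n (· ∈ s) q ∧ ReachR mat num n (· ∈ s) p q) ∧
        (∀ q ∈ Δ, ∀ t ∈ nbs q, AllowedR mat num n (· ∈ s) t →
          t ∈ (dfsB mat num n fuel p (s, sh)).1) := by
  intro fuel
  induction fuel with
  | zero =>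
    intro p s sh hpi hpn hps hU
    exact absurd hU (by have := Ucnt_pos hpi hps; omega)
  | succ fuel ihf =>
    intro p s sh hpi hpn hps hU
    rw [dfsB_succ]
    have hmem₁ : ∀ q, q ∈ PySem.Set.add s p ↔ q ∈ s ∨ q ∈ [p] := by
      intro q
      rw [PySem.Set.mem_add]
      simp
    have hU₁ : Ucnt n (PySem.Set.add s p) ≤ fuel := by
      have := Ucnt_strict hpi hps (fun q => by rw [PySem.Set.mem_add])
      omega
    have hA₁ : ∀ q ∈ [p], AllowedR mat num n (· ∈ s) q ∧ ReachR mat num n (· ∈ s) p q := by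
      intro q hq
      have : q = p := by simpa using hq
      subst this
      exact ⟨⟨hpi, hpn, hps⟩, Relation.ReflTransGen.refl⟩
    obtain ⟨Δ₂, h1, h2, h3, h4, h5, h6, h7, h8⟩ :=
      dfold_spec mat num n fuel ihf (nbs p) p s (PySem.Set.add s p) (sh ++ [p]) [p]
        (fun x hx => hx) hmem₁ (by simp) hA₁ hU₁
    refine ⟨p :: Δ₂, ?_, ?_, by simpa using h3, by simp, ?_, ?_⟩
    · rw [h1, List.append_assoc]; rfl
    · intro q
      rw [h2 q]
      simp
    · intro q hq
      apply h4
      simpa using hq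
    · intro q hq r hr har
      rcases List.mem_cons.1 hq with hq | hq
      · subst hq
        exact h6 r hr har.1 har.2.1
      · exact h5 q hq r hr har

-- ---- both flood fills equal the reachable set; per-seed comparison ----

theorem reach_sub {mat : List (List Int)} {num : Int} {n : Nat} {V0 : Int × Int → Prop}
    {seed : Int × Int} {S : List (Int × Int)}
    (hseed : seed ∈ S)
    (hclosed : ∀ p ∈ S, ∀ q ∈ nbs p, AllowedR mat num n V0 q → q ∈ S)
    {q : Int × Int} (h : ReachR mat num n V0 seed q) : q ∈ S := by
  induction h with
  | refl => exact hseed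
  | tail h1 h2 ih => exact hclosed _ ih _ h2.1 h2.2

theorem reach_congr (mat : List (List Int)) (num : Int) (n : Nat)
    {V0 V0' : Int × Int → Prop}
    (h : ∀ q, InbP n q → (V0 q → V0' q)) {p q : Int × Int}
    (hr : ReachR mat num n V0' p q) : ReachR mat num n V0 p q := by
  refine Relation.ReflTransGen.mono ?_ hr
  rintro a b ⟨h1, h2, h3, h4⟩
  exact ⟨h1, h2, h3, fun hb => h4 (h b h2 hb)⟩

theorem seed_perm (mat : List (List Int)) (num : Int) (n : Nat)
    (v : List (List Int)) (s : PySem.Set (Int × Int)) (i j : Nat)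
    (hi : i < n) (hj : j < n) (hd : Dims n v)
    (hinv : ∀ q, InbP n q → (mget v q.1 q.2 ≠ 0 ↔ q ∈ s))
    (hnum : mget mat (i : Int) (j : Int) = num)
    (hunv : mget v (i : Int) (j : Int) = 0) :
    (qloopA mat num n (n * n + 1) [((i : Int), (j : Int))] (vset v (i : Int) (j : Int)) []).1.Perm
      (dfsB mat num n (n * n + 1) ((i : Int), (j : Int)) (s, [])).2 ∧
    Dims n (qloopA mat num n (n * n + 1) [((i : Int), (j : Int))]
      (vset v (i : Int) (j : Int)) []).2 ∧
    (∀ q, InbP n q →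
      (mget (qloopA mat num n (n * n + 1) [((i : Int), (j : Int))]
          (vset v (i : Int) (j : Int)) []).2 q.1 q.2 ≠ 0 ↔
        q ∈ (dfsB mat num n (n * n + 1) ((i : Int), (j : Int)) (s, [])).1)) := by
  set seed : Int × Int := ((i : Int), (j : Int)) with hseed
  have hsi : InbP n seed :=
    ⟨show (0 : Int) ≤ (i : Int) from Int.natCast_nonneg i,
     show ((i : Nat) : Int) < (n : Int) from by exact_mod_cast hi,
     show (0 : Int) ≤ (j : Int) from Int.natCast_nonneg j,
     show ((j : Nat) : Int) < (n : Int) from by exact_mod_cast hj⟩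
  have hr0 : (0 : Int) ≤ seed.1 := hsi.1
  have hr1 : seed.1 < (n : Int) := hsi.2.1
  have hc0 : (0 : Int) ≤ seed.2 := hsi.2.2.1
  have hc1 : seed.2 < (n : Int) := hsi.2.2.2
  have hnots : seed ∉ s := fun hmem => (by
    have := (hinv seed hsi).2 hmem
    exact this hunv)
  -- A side
  have hd1 : Dims n (vset v seed.1 seed.2) := dims_vset hd hr0 hr1 hc0 hc1
  have hself := mget_vset_self hd hr0 hr1 hc0 hc1
  have h2 : ∀ q, InbP n q → (mget (vset v seed.1 seed.2) q.1 q.2 ≠ 0 ↔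
      (fun p => mget v p.1 p.2 ≠ 0) q ∨ q ∈ ([] : List (Int × Int)) ∨ q ∈ [seed]) := by
    intro q hq
    by_cases hqs : q = seed
    · subst hqs
      simp only [List.mem_singleton, List.not_mem_nil]
      constructor
      · intro _; tauto
      · intro _
        have hone : mget (vset v seed.1 seed.2) seed.1 seed.2 = 1 := hself
        omega
    · rw [mget_vset_ne hd hr0 hr1 hc0 hc1 hq.1 hq.2.1 hq.2.2.1 hq.2.2.2
        (by simpa using hqs)]
      simp only [List.mem_singleton, List.not_mem_nil]
      constructor
      · intro h; exact Or.inl h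
      · rintro (h | h | h)
        · exact h
        · exact absurd h (by simp)
        · exact absurd h hqs
  have h6 : zeros (vset v seed.1 seed.2) + [seed].length ≤ n * n + 1 := by
    have hz := zeros_vset hd hr0 hr1 hc0 hc1 hunv
    have := zeros_le hd
    simp only [List.length_cons, List.length_nil]
    omega
  obtain ⟨cA1, cA2, cA3, cA4, cA5, cA6⟩ :=
    qloopA_spec mat num n (fun p => mget v p.1 p.2 ≠ 0) seed (n * n + 1) [seed]
      (vset v seed.1 seed.2) [] hd1 h2 (by simp)
      (by
        intro p hp
        have : p = seed := by simpa using hp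
        subst this
        exact ⟨⟨hsi, hnum, fun h => h hunv⟩, Relation.ReflTransGen.refl⟩)
      (by intro p hp; simp at hp) h6
  -- B side
  obtain ⟨Δ, hB1, hB2, hB3, hB4, hB5, hB6⟩ :=
    dfsB_spec mat num n (n * n + 1) seed s [] hsi hnum hnots
      (le_trans (Ucnt_le n s) (by omega))
  -- the two blocked predicates agree on in-bounds cells
  have hV : ∀ q, InbP n q → ((fun p => mget v p.1 p.2 ≠ 0) q ↔ q ∈ s) := hinv
  -- set equality of the two components
  have hAiff : ∀ q, q ∈ (qloopA mat num n (n * n + 1) [seed] (vset v seed.1 seed.2) []).1 ↔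
      ReachR mat num n (fun p => mget v p.1 p.2 ≠ 0) seed q := by
    intro q
    constructor
    · intro hq; exact (cA4 q hq).2
    · intro hq
      exact reach_sub (cA6 seed (by simp)) cA5 hq
  have hBiff : ∀ q, q ∈ Δ ↔ ReachR mat num n (· ∈ s) seed q := by
    intro q
    constructor
    · intro hq; exact (hB5 q hq).2
    · intro hq
      refine reach_sub hB4 ?_ hq
      intro a ha b hb hab
      have hbb := hB6 a ha b hb hab
      rw [hB2 b] at hbb
      rcases hbb with h | h
      · exact absurd h hab.2.2
      · exact h
  have hsets : ∀ q, q ∈ (qloopA mat num n (n * n + 1) [seed] (vset v seed.1 seed.2) []).1 ↔ q ∈ Δ := by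
    intro q
    rw [hAiff q, hBiff q]
    constructor
    · intro h; exact reach_congr mat num n (fun r hr => (hV r hr).2) h
    · intro h; exact reach_congr mat num n (fun r hr => (hV r hr).1) h
  refine ⟨?_, cA1, ?_⟩
  · rw [hB1, List.nil_append]
    exact (List.perm_ext_iff_of_nodup cA2 hB3).2 hsets
  · intro q hq
    rw [cA3 q hq, hB2 q, hinv q hq, hsets q]

theorem forall2_snoc {α β : Type} {R : α → β → Prop} {la : List α} {lb : List β}
    (h : List.Forall₂ R la lb) {a : α} {b : β} (hab : R a b) :
    List.Forall₂ R (la ++ [a]) (lb ++ [b]) := by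
  induction h with
  | nil => exact List.Forall₂.cons hab List.Forall₂.nil
  | cons h1 h2 ih => exact List.Forall₂.cons h1 ih

-- ---- the two row-major scans produce pointwise-permuted component lists ----

theorem seeds_rel2 (mat : List (List Int)) (num : Int) (n : Nat) :
    ∀ (ps : List (Nat × Nat)) (v : List (List Int)) (s : PySem.Set (Int × Int))
      (compsA compsB : List (List (Int × Int))),
      (∀ p ∈ ps, p.1 < n ∧ p.2 < n) → Dims n v →
      (∀ q, InbP n q → (mget v q.1 q.2 ≠ 0 ↔ q ∈ s)) →
      List.Forall₂ List.Perm compsA compsB →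
      List.Forall₂ List.Perm
        (ps.foldl (fun (st : List (List Int) × List (List (Int × Int))) p =>
          if mget mat (p.1 : Int) (p.2 : Int) ≠ num ∨ mget st.1 (p.1 : Int) (p.2 : Int) ≠ 0 then st
          else
            (let visit1 := vset st.1 (p.1 : Int) (p.2 : Int)
             let r := qloopA mat num n (n * n + 1) [((p.1 : Int), (p.2 : Int))] visit1 []
             (r.2, st.2 ++ [r.1]))) (v, compsA)).2
        (ps.foldl (fun (st : PySem.Set (Int × Int) × List (List (Int × Int))) p =>
          if mget mat (p.1 : Int) (p.2 : Int) = num ∧ ((p.1 : Int), (p.2 : Int)) ∉ st.1 then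
            (let r := dfsB mat num n (n * n + 1) ((p.1 : Int), (p.2 : Int)) (st.1, [])
             (r.1, st.2 ++ [r.2]))
          else st) (s, compsB)).2 := by
  intro ps
  induction ps with
  | nil =>
    intro v s compsA compsB _ _ _ h
    exact h
  | cons p t ih =>
    intro v s compsA compsB hmem hd hinv hf
    have hp := hmem p List.mem_cons_self
    have hpi : InbP n ((p.1 : Int), (p.2 : Int)) :=
      ⟨show (0 : Int) ≤ (p.1 : Int) from Int.natCast_nonneg p.1,
       show ((p.1 : Nat) : Int) < (n : Int) from by exact_mod_cast hp.1,
       show (0 : Int) ≤ (p.2 : Int) from Int.natCast_nonneg p.2,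
       show ((p.2 : Nat) : Int) < (n : Int) from by exact_mod_cast hp.2⟩
    simp only [List.foldl_cons]
    by_cases hm : mget mat (p.1 : Int) (p.2 : Int) = num
    · by_cases hv : mget v (p.1 : Int) (p.2 : Int) = 0
      · have hns : ((p.1 : Int), (p.2 : Int)) ∉ s := fun hmem2 =>
          ((hinv _ hpi).2 hmem2) hv
        rw [if_neg (by exact not_or.2 ⟨fun h => h hm, fun h => h hv⟩), if_pos ⟨hm, hns⟩]
        obtain ⟨hperm, hdims, hinv'⟩ :=
          seed_perm mat num n v s p.1 p.2 hp.1 hp.2 hd hinv hm hv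
        exact ih _ _ _ _ (fun q hq => hmem q (List.mem_cons_of_mem _ hq)) hdims hinv'
          (forall2_snoc hf hperm)
      · have hs : ((p.1 : Int), (p.2 : Int)) ∈ s := (hinv _ hpi).1 hv
        rw [if_pos (Or.inr hv), if_neg (by rintro ⟨_, hns⟩; exact hns hs)]
        exact ih _ _ _ _ (fun q hq => hmem q (List.mem_cons_of_mem _ hq)) hd hinv hf
    · rw [if_pos (Or.inl hm), if_neg (by rintro ⟨hmm, _⟩; exact hm hmm)]
      exact ih _ _ _ _ (fun q hq => hmem q (List.mem_cons_of_mem _ hq)) hd hinv hf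

-- the two flood-fill passes return pointwise-permuted component lists
theorem components_perm (mat : List (List Int)) (num : Int) (n : Nat) :
    List.Forall₂ List.Perm (bfsA mat num n) (componentsB mat num n) := by
  unfold bfsA componentsB
  rw [foldl_nested (fun (st : List (List Int) × List (List (Int × Int))) i j =>
      if mget mat (i : Int) (j : Int) ≠ num ∨ mget st.1 (i : Int) (j : Int) ≠ 0 then st
      else
        (let visit1 := vset st.1 (i : Int) (j : Int)
         let r := qloopA mat num n (n * n + 1) [((i : Int), (j : Int))] visit1 []
         (r.2, st.2 ++ [r.1]))) n (List.replicate n (List.replicate n 0), []),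
    foldl_nested (fun (st : PySem.Set (Int × Int) × List (List (Int × Int))) i j =>
      if mget mat (i : Int) (j : Int) = num ∧ ((i : Int), (j : Int)) ∉ st.1 then
        (let r := dfsB mat num n (n * n + 1) ((i : Int), (j : Int)) (st.1, [])
         (r.1, st.2 ++ [r.2]))
      else st) n (PySem.Set.empty, [])]
  exact seeds_rel2 mat num n _ _ _ _ _ (fun p hp => mem_pairs hp) (dims_init n)
    (by
      intro q hq
      rw [mget_init n hq]
      simp [PySem.Set.empty])
    List.Forall₂.nil

-- ---- the hash is invariant under permutation of a shape's cells ----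

theorem min?_id_perm {xs ys : List Int} (h : xs.Perm ys) :
    PySem.List.min? xs (fun x => x) = PySem.List.min? ys (fun x => x) := by
  match hxs : PySem.List.min? xs (fun x => x), hys : PySem.List.min? ys (fun x => x) with
  | none, none => rfl
  | none, some b =>
    rw [PySem.List.min?_eq_none_iff] at hxs
    subst hxs
    have : ys = [] := h.symm.eq_nil
    subst this
    simp [PySem.List.min?] at hys
  | some a, none =>
    rw [PySem.List.min?_eq_none_iff] at hys
    subst hys
    have : xs = [] := h.eq_nil
    subst this
    simp [PySem.List.min?] at hxs
  | some a, some b =>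
    have ha := PySem.List.min?_mem hxs
    have hb := PySem.List.min?_mem hys
    have haMin := PySem.List.min?_isMin hxs
    have hbMin := PySem.List.min?_isMin hys
    have h1 : a ≤ b := haMin b (h.mem_iff.2 hb)
    have h2 : b ≤ a := hbMin a (h.mem_iff.1 ha)
    rw [le_antisymm h1 h2]

theorem sorted2_lex (xs : List (Int × Int)) :
    PySem.List.sorted2 xs (fun p => p.1) (fun p => p.2)
      = PySem.List.sorted xs (fun p => (toLex (p.1, p.2) : Lex (Int × Int))) := by
  have hb : (fun (a b : Int × Int) =>
        decide (a.1 < b.1) || (!decide (b.1 < a.1) && decide (a.2 < b.2)))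
      = fun (a b : Int × Int) =>
        decide ((toLex (a.1, a.2) : Lex (Int × Int)) < toLex (b.1, b.2)) := by
    funext a b
    by_cases h1 : a.1 < b.1 <;> by_cases h2 : b.1 < a.1 <;> by_cases h3 : a.2 < b.2 <;>
      simp [Prod.Lex.lt_iff, h1, h2, h3] <;> omega
  show List.foldl (fun acc x => PySem.List.insertBy
      (fun a b => decide (a.1 < b.1) || (!decide (b.1 < a.1) && decide (a.2 < b.2))) x acc) [] xs
    = List.foldl (fun acc x => PySem.List.insertBy
      (fun a b => decide ((toLex (a.1, a.2) : Lex (Int × Int)) < toLex (b.1, b.2))) x acc) [] xs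
  rw [hb]

theorem lexkey_inj : Function.Injective (fun p : Int × Int => (toLex (p.1, p.2) : Lex (Int × Int))) := by
  intro a b hab
  have h2 : ((a.1, a.2) : Int × Int) = (b.1, b.2) := toLex.injective hab
  obtain ⟨h3, h4⟩ := Prod.mk.inj h2
  exact Prod.ext h3 h4

theorem hashing_perm {xs ys : List (Int × Int)} (h : xs.Perm ys) : hashing xs = hashing ys := by
  simp only [hashing]
  rw [min?_id_perm (h.map Prod.fst), min?_id_perm (h.map Prod.snd)]
  rw [sorted2_lex, sorted2_lex,
    PySem.List.sorted_eq_sorted_of_perm _ _ _ lexkey_inj (h.map _)]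

-- ---- matching phase: A's flag-guarded 4-rotation scan vs B's recursive consume ----

theorem match_perm (blankA blankB : List (Int × Int)) (d : PySem.Dict String Int) (ans : Int)
    (h : blankA.Perm blankB) :
    (((List.range 4).foldl stepMA (blankA, false, d, ans)).2.2.1,
     ((List.range 4).foldl stepMA (blankA, false, d, ans)).2.2.2)
      = ((consume 4 blankB d).1, ans + (consume 4 blankB d).2) := by
  have h4 : List.range 4 = [0, 1, 2, 3] := by decide
  have hp0 : blankA.Perm blankB := h
  have hp1 : (rotateS blankA).Perm (blankB.map (fun p => (p.2, -p.1))) := h.map _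
  have hp2 : (rotateS (rotateS blankA)).Perm
      ((blankB.map (fun p => (p.2, -p.1))).map (fun p => (p.2, -p.1))) := hp1.map _
  have hp3 : (rotateS (rotateS (rotateS blankA))).Perm
      (((blankB.map (fun p => (p.2, -p.1))).map (fun p => (p.2, -p.1))).map
        (fun p => (p.2, -p.1))) := hp2.map _
  have e0 := hashing_perm hp0
  have e1 := hashing_perm hp1
  have e2 := hashing_perm hp2
  have e3 := hashing_perm hp3
  have l0 := hp0.length_eq
  have l1 := hp1.length_eq
  have l2 := hp2.length_eq
  have l3 := hp3.length_eq
  simp only [List.map_map] at e0 e1 e2 e3 l0 l1 l2 l3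
  rw [h4]
  simp only [List.foldl_cons, List.foldl_nil]
  by_cases h1 : d.getD (hashing blankA) 0 ≠ 0
  · have h1' := e0 ▸ h1
    simp [stepMA, consume, h1, h1', e0, l0]
  · have h1' := e0 ▸ h1
    by_cases h2 : d.getD (hashing (rotateS blankA)) 0 ≠ 0
    · have h2' := e1 ▸ h2
      simp [stepMA, consume, h1, h1', h2, h2', e1, l1]
    · have h2' := e1 ▸ h2
      by_cases h3 : d.getD (hashing (rotateS (rotateS blankA))) 0 ≠ 0
      · have h3' := e2 ▸ h3
        simp [stepMA, consume, h1, h1', h2, h2', h3, h3', e2, l2]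
      · have h3' := e2 ▸ h3
        by_cases h5 : d.getD (hashing (rotateS (rotateS (rotateS blankA)))) 0 ≠ 0
        · have h5' := e3 ▸ h5
          simp [stepMA, consume, h1, h1', h2, h2', h3, h3', h5, h5', e3, l3]
        · have h5' := e3 ▸ h5
          simp [stepMA, consume, h1, h1', h2, h2', h3, h3', h5, h5']

-- generic fold congruence along pointwise-related lists
theorem foldl_congr_forall2 {σ α β : Type} {R : α → β → Prop}
    {f : σ → α → σ} {g : σ → β → σ}
    (hfg : ∀ s a b, R a b → f s a = g s b) :
    ∀ {la : List α} {lb : List β}, List.Forall₂ R la lb → ∀ s, la.foldl f s = lb.foldl g s := by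
  intro la lb h
  induction h with
  | nil => intro s; rfl
  | cons hab hrest ih =>
    intro s
    simp only [List.foldl_cons]
    rw [hfg s _ _ hab]
    exact ih _

-- ===== VERDICT (by name: the statement is the Claim_ definition above) =====
theorem solution_spec : Claim_equal_solution := by
  intro game_board table _ _
  show solution game_board table = solution_alt game_board table
  simp only [solution, solution_alt]
  have hblocks := components_perm table 1 game_board.length
  have hblanks := components_perm game_board 0 game_board.length
  have hbh : (bfsA table 1 game_board.length).foldl
      (fun (d : PySem.Dict String Int) b => d.insert (hashing b) (d.getD (hashing b) 0 + 1))
      PySem.Dict.empty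
      = (componentsB table 1 game_board.length).foldl
        (fun (d : PySem.Dict String Int) b => d.insert (hashing b) (d.getD (hashing b) 0 + 1))
        PySem.Dict.empty := by
    refine foldl_congr_forall2 ?_ hblocks _
    intro d a b hab
    rw [hashing_perm hab]
  rw [hbh]
  exact congrArg Prod.snd (foldl_congr_forall2
    (fun st a b hab => match_perm a b st.1 st.2 hab) hblanks _)
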